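-- pv_equiv track=rewrite | github.com/lsc19962006/UofPeople-Assignment | Python course/Assgnment 08/Part 2.py | missing_letters
-- ===== SOURCE A (Python) =====
-- alphabet = "abcdefghijklmnopqrstuvwxyz"
--
-- def histogram(s):
--      d = dict()
--      for c in s:
--           if c not in d:
--                d[c] = 1
--           else:
--                d[c] += 1
--      return d
--
-- def missing_letters(strpara):
--          k=list(alphabet)
--          for j in histogram(strpara).keys():
--               if j in alphabet:
--                    k.remove(j)
--          while " " in k:
--              k.remove(" ")
--          return k
-- ===== SOURCE B (Python) =====
-- alphabet = "abcdefghijklmnopqrstuvwxyz"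
--
-- def missing_letters(strpara):
--     return sorted(set(alphabet) - set(strpara))
-- ===== Notes on version B (the rewrite author's own statement) =====
-- stated objective: simpler
-- what changed: Replaces the histogram dict plus per-key list.remove loop (and the space-removal while loop) with a single set difference set(alphabet) - set(strpara) followed by a sort.
import Mathlib
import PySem

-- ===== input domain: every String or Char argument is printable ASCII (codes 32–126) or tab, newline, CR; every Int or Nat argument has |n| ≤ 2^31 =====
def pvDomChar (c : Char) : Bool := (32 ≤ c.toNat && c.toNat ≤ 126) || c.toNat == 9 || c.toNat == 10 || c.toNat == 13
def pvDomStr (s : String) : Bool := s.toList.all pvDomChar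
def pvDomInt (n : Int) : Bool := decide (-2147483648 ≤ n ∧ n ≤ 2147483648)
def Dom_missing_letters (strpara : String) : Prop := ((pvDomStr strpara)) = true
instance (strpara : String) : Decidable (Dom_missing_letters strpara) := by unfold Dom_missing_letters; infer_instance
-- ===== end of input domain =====

-- B replaces A's histogram dict + per-letter list.remove loop by a set difference
-- (set(alphabet) - set(strpara)) followed by a sort; objective: simpler. Same return value.

-- module constant shared by the Python module
def pvAlphabet : String := "abcdefghijklmnopqrstuvwxyz"

-- ===== PORT A =====
-- helper 'histogram(s)': dict over the 1-char strings of s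
def pvHistogram (s : String) : PySem.Dict String Int :=
  s.toList.foldl
    (fun d c =>
      let j := String.singleton c
      if !(d.contains j) then d.insert j 1 else d.modify j 0 (· + 1))
    PySem.Dict.empty

-- 'while " " in k: k.remove(" ")' — each pass removes one element, so k.length is enough fuel
def pvRemoveSpaces : Nat → List String → List String
  | 0, k => k
  | n + 1, k =>
      if " " ∈ k then pvRemoveSpaces n ((PySem.List.remove? k " ").getD k) else k

def missing_letters (strpara : String) : List String :=
  let k0 := pvAlphabet.toList.map String.singleton  -- k = list(alphabet)
  let k1 := (pvHistogram strpara).keys.foldl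
      (fun k j =>
        if PySem.Str.isIn j pvAlphabet then (PySem.List.remove? k j).getD k else k) k0
  pvRemoveSpaces k1.length k1

-- ===== PORT B =====
-- return sorted(set(alphabet) - set(strpara))
def missing_letters_alt (strpara : String) : List String :=
  PySem.List.sorted
    (PySem.Set.diff (PySem.Set.ofList (pvAlphabet.toList.map String.singleton))
                    (PySem.Set.ofList (strpara.toList.map String.singleton)))
    (fun x => x) false

-- ===== PRECONDITION & SPEC =====
def Spec_missing_letters (strpara : String) (out : List String) : Prop := out = missing_letters_alt strpara
instance (strpara : String) (out : List String) : Decidable (Spec_missing_letters strpara out) := by unfold Spec_missing_letters; infer_instance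

-- ===== CLAIM (what is proved, stated in full; the proofs are below) =====
def Claim_equal_missing_letters : Prop := ∀ (strpara : String), Dom_missing_letters strpara → Spec_missing_letters strpara (missing_letters strpara)

-- ===== LEMMAS AND PROOFS =====

-- the histogram's key list is exactly set(chars of s) in first-occurrence order
theorem keys_pvHistogram_aux (l : List Char) (d : PySem.Dict String Int) :
    (l.foldl
      (fun d c =>
        let j := String.singleton c
        if !(d.contains j) then d.insert j 1 else d.modify j 0 (· + 1)) d).keys
    = PySem.Set.update d.keys (l.map String.singleton) := by
  induction l generalizing d with
  | nil => rfl
  | cons c tl ih =>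
      simp only [List.foldl_cons, List.map_cons, PySem.Set.update, List.foldl_cons]
      by_cases h : d.contains (String.singleton c) = true
      · have hm : String.singleton c ∈ d.keys :=
          (PySem.Dict.contains_iff_mem_keys d (String.singleton c)).1 h
        simp only [h, Bool.not_true, Bool.false_eq_true, if_false]
        rw [ih]
        simp [PySem.Set.update, PySem.Set.add, PySem.Set.contains, hm,
          PySem.Dict.modify, PySem.Dict.keys_insert_of_contains d _ h]
      · have h' : d.contains (String.singleton c) = false := by
          simpa using h
        have hm : String.singleton c ∉ d.keys := fun hmem =>
          h ((PySem.Dict.contains_iff_mem_keys d (String.singleton c)).2 hmem)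
        simp only [h', Bool.not_false]
        rw [ih]
        simp [PySem.Set.update, PySem.Set.add, PySem.Set.contains, hm,
          PySem.Dict.keys_insert_of_not_contains d _ h']

theorem keys_pvHistogram (s : String) :
    (pvHistogram s).keys = PySem.Set.ofList (s.toList.map String.singleton) := by
  rw [pvHistogram, keys_pvHistogram_aux]
  simp [PySem.Set.ofList, PySem.Set.update, PySem.Dict.keys_empty, PySem.Set.empty]

-- one removal step on a duplicate-free list is a filter
theorem remove_step_eq_filter (k : List String) (j : String) (hk : k.Nodup) :
    (PySem.List.remove? k j).getD k = k.filter (fun x => x != j) := by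
  by_cases hj : j ∈ k
  · rw [PySem.List.remove?_eq_some_erase k j hj, Option.getD_some,
      List.Nodup.erase_eq_filter hk]
  · rw [(PySem.List.remove?_eq_none_iff k j).2 hj, Option.getD_none]
    exact (List.filter_eq_self.2 (fun x hx => by
      simp only [bne_iff_ne, ne_eq]
      rintro rfl; exact hj hx)).symm

-- the whole removal loop over the key list is a single filter
theorem fold_remove_eq_filter (ks : List String) :
    ∀ (k : List String), k.Nodup →
      ks.foldl
        (fun k j =>
          if PySem.Str.isIn j pvAlphabet then (PySem.List.remove? k j).getD k else k) k
      = k.filter (fun x => !(decide (x ∈ ks) && PySem.Str.isIn x pvAlphabet)) := by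
  induction ks with
  | nil => intro k _; simp
  | cons j tl ih =>
      intro k hk
      simp only [List.foldl_cons]
      by_cases hj : PySem.Str.isIn j pvAlphabet = true
      · rw [if_pos hj, remove_step_eq_filter k j hk,
          ih _ (hk.filter _), List.filter_filter]
        apply List.filter_congr
        intro x _
        by_cases hx : x = j
        · subst hx
          have hj' : PySem.Chars.isIn x.toList pvAlphabet.toList = true := by
            simpa [PySem.Str.isIn] using hj
          simp [hj']
        · simp [hx, bne_iff_ne]
      · rw [if_neg hj, ih k hk]
        apply List.filter_congr
        intro x _
        by_cases hx : x = j
        · subst hx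
          simp [Bool.eq_false_iff.1 (by simpa using hj)]
        · simp [hx]

-- the alphabet letter list: duplicate-free, every element is a substring of the alphabet,
-- no space, already in nondecreasing order, and set(alphabet) of it is itself
theorem alpha_nodup : (pvAlphabet.toList.map String.singleton).Nodup := by decide

theorem alpha_isIn : ∀ x ∈ pvAlphabet.toList.map String.singleton,
    PySem.Str.isIn x pvAlphabet = true := by decide

theorem alpha_no_space : " " ∉ pvAlphabet.toList.map String.singleton := by decide

theorem alpha_ofList :
    PySem.Set.ofList (pvAlphabet.toList.map String.singleton)
      = pvAlphabet.toList.map String.singleton := by decide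

theorem alpha_pairwise :
    List.Pairwise (fun a b : String => a ≤ b) (pvAlphabet.toList.map String.singleton) := by
  rw [pvAlphabet, List.pairwise_map]
  simp only [String.le_iff_toList_le, String.toList_singleton]
  decide

-- the space-removal loop does nothing when no space is present
theorem pvRemoveSpaces_of_not_mem (n : Nat) (k : List String) (h : " " ∉ k) :
    pvRemoveSpaces n k = k := by
  cases n with
  | zero => rfl
  | succ m => rw [pvRemoveSpaces, if_neg h]

-- both sides equal the same filter of the alphabet list
theorem missing_letters_eq_filter (strpara : String) :
    missing_letters strpara
      = (pvAlphabet.toList.map String.singleton).filter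
          (fun x => !decide (x ∈ strpara.toList.map String.singleton)) := by
  rw [missing_letters]
  simp only [keys_pvHistogram]
  rw [fold_remove_eq_filter _ _ alpha_nodup]
  have hfe : (pvAlphabet.toList.map String.singleton).filter
        (fun x => !(decide (x ∈ PySem.Set.ofList (strpara.toList.map String.singleton))
            && PySem.Str.isIn x pvAlphabet))
      = (pvAlphabet.toList.map String.singleton).filter
          (fun x => !decide (x ∈ strpara.toList.map String.singleton)) := by
    apply List.filter_congr
    intro x hx
    have hx' : PySem.Chars.isIn x.toList pvAlphabet.toList = true := by
      simpa [PySem.Str.isIn] using alpha_isIn x hx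
    simp [hx', PySem.Set.mem_ofList]
  rw [hfe]
  apply pvRemoveSpaces_of_not_mem
  intro hmem
  exact alpha_no_space (List.mem_of_mem_filter hmem)

theorem missing_letters_alt_eq_filter (strpara : String) :
    missing_letters_alt strpara
      = (pvAlphabet.toList.map String.singleton).filter
          (fun x => !decide (x ∈ strpara.toList.map String.singleton)) := by
  rw [missing_letters_alt, alpha_ofList]
  have hdiff : PySem.Set.diff (pvAlphabet.toList.map String.singleton)
        (PySem.Set.ofList (strpara.toList.map String.singleton))
      = (pvAlphabet.toList.map String.singleton).filter
          (fun x => !decide (x ∈ strpara.toList.map String.singleton)) := by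
    rw [PySem.Set.diff]
    apply List.filter_congr
    intro x _
    simp [PySem.Set.contains, PySem.Set.mem_ofList]
  rw [hdiff]
  exact PySem.List.sorted_eq_self_of_pairwise _ _ (alpha_pairwise.filter _)

-- ===== VERDICT (by name: the statement is the Claim_ definition above) =====
theorem missing_letters_spec : Claim_equal_missing_letters := by
  intro strpara _
  unfold Spec_missing_letters
  rw [missing_letters_eq_filter, missing_letters_alt_eq_filter]
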